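-- pv_equiv track=rewrite | github.com/JonasBaeumer/Learning | AdventOfCode2025/day10.py | find_shortest_path_to_joltage_state
-- ===== SOURCE A (Python) =====
-- from collections import deque
--
-- def _increase_joltage(joltage: list[int], instruction: list[int]):
-- 	new_joltage = joltage.copy()
-- 	for idx in instruction:
-- 		new_joltage[idx] += 1
-- 	return new_joltage
--
-- def find_shortest_path_to_joltage_state(goal_state: list[int], instructions: list[list[int]]):
-- 	start_state = [0] * len(goal_state)
-- 	visited = set()
-- 	queue = deque()
--
-- 	queue.append((start_state, 0))
-- 	while queue:
-- 		state, index = queue.popleft()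
-- 		state_tuple = tuple(state)
-- 		if state_tuple in visited:
-- 			continue
-- 		visited.add(state_tuple)
--
-- 		if state == goal_state:
-- 			return index
--
-- 		for instruction in instructions:
-- 			new_state = _increase_joltage(state, instruction)
-- 			new_state_tuple = tuple(new_state)
-- 			if any(new_state[i] > goal_state[i] for i in range(len(new_state))):
-- 				continue
-- 			if new_state_tuple not in visited:
-- 				queue.append((new_state, index + 1))
-- 	return -1
-- ===== SOURCE B (Python) =====
-- def find_shortest_path_to_joltage_state(goal_state, instructions):
-- 	if all(v == 0 for v in goal_state):
-- 		return 0
-- 	n = len(goal_state)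
-- 	deltas = set()
-- 	for instruction in instructions:
-- 		d = [0] * n
-- 		for idx in instruction:
-- 			d[idx] += 1
-- 		if any(d):
-- 			deltas.add(tuple(d))
-- 	total = sum(goal_state)
-- 	frontier = {(0,) * n}
-- 	for depth in range(1, total + 1):
-- 		if not frontier:
-- 			return -1
-- 		frontier = {
-- 			t
-- 			for s in frontier
-- 			for d in deltas
-- 			for t in [tuple(s[i] + d[i] for i in range(n))]
-- 			if all(t[i] <= goal_state[i] for i in range(n))
-- 		}
-- 		if tuple(goal_state) in frontier:
-- 			return depth
-- 	return -1
-- ===== Notes on version B (the rewrite author's own statement) =====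
-- stated objective: alternative
-- what changed: Replaces the FIFO-queue/visited-set BFS with a level-synchronous reachability iteration: instruction increment vectors are precomputed once as a deduplicated set of nonzero delta tuples, and the set of states reachable in exactly k steps is rebuilt level by level for k = 1..sum(goal_state) (a closed-form iteration bound) with no queue and no visited set.
import Mathlib
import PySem

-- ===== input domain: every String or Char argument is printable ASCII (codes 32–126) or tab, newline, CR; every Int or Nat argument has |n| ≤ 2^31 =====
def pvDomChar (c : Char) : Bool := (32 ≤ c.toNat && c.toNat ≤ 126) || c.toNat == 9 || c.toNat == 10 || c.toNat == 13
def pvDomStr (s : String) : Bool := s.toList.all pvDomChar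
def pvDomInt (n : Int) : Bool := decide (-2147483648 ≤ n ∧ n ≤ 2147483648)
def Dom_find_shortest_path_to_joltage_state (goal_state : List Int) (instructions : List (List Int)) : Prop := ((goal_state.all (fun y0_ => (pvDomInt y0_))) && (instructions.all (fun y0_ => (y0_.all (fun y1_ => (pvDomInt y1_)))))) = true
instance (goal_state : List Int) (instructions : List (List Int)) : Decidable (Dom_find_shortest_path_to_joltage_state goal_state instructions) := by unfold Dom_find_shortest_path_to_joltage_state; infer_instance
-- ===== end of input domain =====

-- B replaces A's FIFO-queue/visited-set BFS by a level-synchronous reachability iteration over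
-- precomputed deduplicated nonzero instruction deltas, bounded by sum(goal_state) (objective: alternative).

-- `xs[idx] += 1` on a Python list: exact where the index is in range (Python raises IndexError
-- otherwise; those inputs are outside Pre_).
def pvResolve (len : Nat) (idx : Int) : Int := if idx < 0 then idx + len else idx

def pvIncAt (xs : List Int) (idx : Int) : List Int :=
  if 0 ≤ pvResolve xs.length idx ∧ pvResolve xs.length idx < (xs.length : Int)
  then xs.modify (pvResolve xs.length idx).toNat (fun x => x + 1) else xs

-- ===== PORT A =====
-- _increase_joltage
def fspA_inc (joltage : List Int) (instruction : List Int) : List Int :=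
  instruction.foldl pvIncAt joltage

-- the body of `for instruction in instructions: …` appending to the queue
def fspA_enqueue (goal_state : List Int) (instructions : List (List Int)) (state : List Int)
    (index : Int) (visited : PySem.Set (List Int)) (q : List (List Int × Int)) :
    List (List Int × Int) :=
  instructions.foldl (fun q instruction =>
    let new_state := fspA_inc state instruction
    if (List.range new_state.length).any (fun i => decide (goal_state.getD i 0 < new_state.getD i 0)) then q
    else if PySem.Set.contains visited new_state then q
    else q ++ [(new_state, index + 1)]) q

-- the `while queue:` loop; fuel is a termination guard only (proven sufficient below)
def fspA_loop (goal_state : List Int) (instructions : List (List Int)) :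
    Nat → List (List Int × Int) → PySem.Set (List Int) → Int
  | 0, _, _ => -1
  | _ + 1, [], _ => -1
  | fuel + 1, (state, index) :: rest, visited =>
    if PySem.Set.contains visited state then fspA_loop goal_state instructions fuel rest visited
    else
      let visited' := PySem.Set.add visited state
      if state = goal_state then index
      else fspA_loop goal_state instructions fuel
        (fspA_enqueue goal_state instructions state index visited' rest) visited'

def find_shortest_path_to_joltage_state (goal_state : List Int) (instructions : List (List Int)) : Int :=
  fspA_loop goal_state instructions
    (2 + (instructions.length + 1) * ((goal_state.map (fun x => x.toNat + 1)).prod))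
    [(List.replicate goal_state.length 0, 0)] PySem.Set.empty

-- ===== PORT B =====
-- `d = [0]*n; for idx in instruction: d[idx] += 1`
def fspB_delta (n : Nat) (instruction : List Int) : List Int :=
  instruction.foldl pvIncAt (List.replicate n 0)

-- the set `deltas` of nonzero increment vectors
def fspB_deltas (n : Nat) (instructions : List (List Int)) : PySem.Set (List Int) :=
  instructions.foldl (fun ds instruction =>
    let d := fspB_delta n instruction
    if d.any (fun x => decide (x ≠ 0)) then PySem.Set.add ds d else ds) PySem.Set.empty

-- one level: the set comprehension over frontier × deltas (tuple(s[i]+d[i] …) is zipWith (+):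
-- both lists have length n)
def fspB_step (goal_state : List Int) (deltas : PySem.Set (List Int))
    (frontier : PySem.Set (List Int)) : PySem.Set (List Int) :=
  frontier.foldl (fun acc s =>
    deltas.foldl (fun acc d =>
      let t := List.zipWith (fun a b => a + b) s d
      if (List.range goal_state.length).all (fun i => decide (t.getD i 0 ≤ goal_state.getD i 0))
      then PySem.Set.add acc t else acc) acc) PySem.Set.empty

-- `for depth in range(1, total+1): …` — ported as a counted loop (range is lazy in Python):
-- count = number of remaining iterations, depth = the current range value
def fspB_loop (goal_state : List Int) (deltas : PySem.Set (List Int)) :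
    Nat → Int → PySem.Set (List Int) → Int
  | 0, _, _ => -1
  | count + 1, depth, frontier =>
    if frontier.isEmpty then -1
    else
      let frontier' := fspB_step goal_state deltas frontier
      if PySem.Set.contains frontier' goal_state then depth
      else fspB_loop goal_state deltas count (depth + 1) frontier'

def find_shortest_path_to_joltage_state_alt (goal_state : List Int) (instructions : List (List Int)) : Int :=
  if goal_state.all (fun v => decide (v = 0)) then 0
  else
    -- range(1, total+1) performs max(total, 0) = total.toNat iterations starting at depth 1
    fspB_loop goal_state (fspB_deltas goal_state.length instructions)
      goal_state.sum.toNat 1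
      (PySem.Set.ofList [List.replicate goal_state.length 0])

-- ===== PRECONDITION & SPEC =====
-- Pre_ excludes exactly the inputs on which Python A raises IndexError: a goal that is not
-- all-zero together with some instruction index outside [-len(goal), len(goal)).
def Pre_find_shortest_path_to_joltage_state (goal_state : List Int) (instructions : List (List Int)) : Prop :=
  (∀ v ∈ goal_state, v = 0) ∨
  (∀ ins ∈ instructions, ∀ idx ∈ ins, -(goal_state.length : Int) ≤ idx ∧ idx < (goal_state.length : Int))
instance (goal_state : List Int) (instructions : List (List Int)) :
    Decidable (Pre_find_shortest_path_to_joltage_state goal_state instructions) := by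
  unfold Pre_find_shortest_path_to_joltage_state; infer_instance

def pvWitness_find_shortest_path_to_joltage_state : List Int × List (List Int) :=
  ([2, 1], [[0], [0, 1]])

def Spec_find_shortest_path_to_joltage_state (goal_state : List Int) (instructions : List (List Int)) (out : Int) : Prop := out = find_shortest_path_to_joltage_state_alt goal_state instructions
instance (goal_state : List Int) (instructions : List (List Int)) (out : Int) : Decidable (Spec_find_shortest_path_to_joltage_state goal_state instructions out) := by unfold Spec_find_shortest_path_to_joltage_state; infer_instance

-- ===== CLAIM (what is proved, stated in full; the proofs are below) =====
def Claim_equal_find_shortest_path_to_joltage_state : Prop := ∀ (goal_state : List Int) (instructions : List (List Int)), Dom_find_shortest_path_to_joltage_state goal_state instructions → Pre_find_shortest_path_to_joltage_state goal_state instructions → Spec_find_shortest_path_to_joltage_state goal_state instructions (find_shortest_path_to_joltage_state goal_state instructions)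

-- ===== LEMMAS AND PROOFS =====

-- ---------- vector basics ----------

-- pointwise ≤ on equal-length integer vectors
def VLe (s t : List Int) : Prop :=
  s.length = t.length ∧ ∀ i, i < s.length → s.getD i 0 ≤ t.getD i 0

-- componentwise nonnegative
def VNN (s : List Int) : Prop := ∀ x ∈ s, 0 ≤ x

-- the finite box a visited state lives in
def InBox (g s : List Int) : Prop :=
  s.length = g.length ∧ ∀ i, i < s.length → 0 ≤ s.getD i 0 ∧ s.getD i 0 ≤ ((g.getD i 0).toNat : Int)

def ZV (n : Nat) : List Int := List.replicate n 0

def vadd (s d : List Int) : List Int := List.zipWith (fun a b => a + b) s d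

-- ---------- reachability ----------

-- t is reachable from s in exactly k additions of vectors from D (last-step form)
inductive DReach (D : List (List Int)) : Nat → List Int → List Int → Prop
  | refl (s : List Int) : DReach D 0 s s
  | step {k : Nat} {s u : List Int} (d : List Int) (hd : d ∈ D)
      (hr : DReach D k s u) : DReach D (k + 1) s (vadd u d)

-- the delta vectors of A's instructions
def deltasA (g : List Int) (I : List (List Int)) : List (List Int) :=
  I.map (fun ins => fspB_delta g.length ins)

-- "r is the minimal number of steps reaching g from the zero vector (or -1 if unreachable)"
def IsAns (R : Nat → Prop) (r : Int) : Prop :=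
  (r = -1 ∧ ∀ k, ¬ R k) ∨ (∃ m : Nat, r = (m : Int) ∧ R m ∧ ∀ k, R k → m ≤ k)

lemma IsAns_unique {R₁ R₂ : Nat → Prop} {r₁ r₂ : Int}
    (h12 : ∀ k, R₂ k → R₁ k) (h21 : ∀ k, R₁ k → ∃ k' ≤ k, R₂ k')
    (H1 : IsAns R₁ r₁) (H2 : IsAns R₂ r₂) : r₁ = r₂ := by
  rcases H1 with ⟨he1, hn1⟩ | ⟨m₁, he1, hr1, hm1⟩
  · rcases H2 with ⟨he2, _⟩ | ⟨m₂, he2, hr2, _⟩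
    · rw [he1, he2]
    · exact absurd (h12 _ hr2) (hn1 m₂)
  · rcases H2 with ⟨he2, hn2⟩ | ⟨m₂, he2, hr2, hm2⟩
    · rcases h21 _ hr1 with ⟨k', _, hk'⟩
      exact absurd hk' (hn2 k')
    · rcases h21 _ hr1 with ⟨k', hk'le, hk'⟩
      have h1 : m₁ ≤ m₂ := hm1 _ (h12 _ hr2)
      have h2 : m₂ ≤ m₁ := le_trans (hm2 _ hk') hk'le
      rw [he1, he2]; omega

-- ---------- basic facts about pvIncAt / vadd ----------

lemma length_pvIncAt (xs : List Int) (idx : Int) : (pvIncAt xs idx).length = xs.length := by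
  unfold pvIncAt; split
  · exact List.length_modify _ _ _
  · rfl

lemma length_vadd (s d : List Int) : (vadd s d).length = min s.length d.length := by
  simp [vadd]

lemma getD_vadd (s d : List Int) (j : Nat) (h : j < s.length) (h2 : s.length = d.length) :
    (vadd s d).getD j 0 = s.getD j 0 + d.getD j 0 := by
  have hj : j < (vadd s d).length := by rw [length_vadd]; omega
  rw [List.getD_eq_getElem _ _ hj, List.getD_eq_getElem _ _ h,
    List.getD_eq_getElem _ _ (by omega : j < d.length)]
  simp [vadd, List.getElem_zipWith]

lemma mem_modify_add_one (xs : List Int) (i : Nat) (x : Int)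
    (h : x ∈ xs.modify i (fun y => y + 1)) : x ∈ xs ∨ ∃ y ∈ xs, x = y + 1 := by
  induction xs generalizing i with
  | nil => simp at h
  | cons a l ih =>
    cases i with
    | zero =>
      rw [List.modify_zero_cons] at h
      rcases List.mem_cons.mp h with h | h
      · right; exact ⟨a, by simp, h⟩
      · left; simp [h]
    | succ i =>
      rw [List.modify_succ_cons] at h
      rcases List.mem_cons.mp h with h | h
      · left; simp [h]
      · rcases ih i h with h' | ⟨y, hy, hxy⟩
        · left; simp [h']
        · right; exact ⟨y, by simp [hy], hxy⟩

lemma VNN_pvIncAt {xs : List Int} (idx : Int) (h : VNN xs) : VNN (pvIncAt xs idx) := by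
  intro x hx
  unfold pvIncAt at hx
  split at hx
  · rcases mem_modify_add_one _ _ _ hx with h' | ⟨y, hy, hxy⟩
    · exact h _ h'
    · have := h _ hy; omega
  · exact h _ hx

lemma length_fspA_inc (s ins : List Int) : (fspA_inc s ins).length = s.length := by
  unfold fspA_inc
  induction ins generalizing s with
  | nil => rfl
  | cons a l ih => simpa [length_pvIncAt] using ih (pvIncAt s a)

lemma length_fspB_delta (n : Nat) (ins : List Int) : (fspB_delta n ins).length = n := by
  have := length_fspA_inc (List.replicate n 0) ins
  simpa [fspA_inc, fspB_delta] using this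

lemma VNN_fspB_delta (n : Nat) (ins : List Int) : VNN (fspB_delta n ins) := by
  unfold fspB_delta
  have h0 : VNN (List.replicate n (0 : Int)) := by intro x hx; simp at hx; omega
  generalize List.replicate n (0 : Int) = b at h0 ⊢
  induction ins generalizing b with
  | nil => exact h0
  | cons a l ih => exact ih _ (VNN_pvIncAt a h0)

lemma pvIncAt_vadd (s b : List Int) (idx : Int) (h : s.length = b.length) :
    pvIncAt (vadd s b) idx = vadd s (pvIncAt b idx) := by
  have hlv : (vadd s b).length = b.length := by rw [length_vadd]; omega
  unfold pvIncAt
  rw [hlv]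
  by_cases hcond : 0 ≤ pvResolve b.length idx ∧ pvResolve b.length idx < (b.length : Int)
  · rw [if_pos hcond, if_pos hcond]
    apply List.ext_getElem
    · rw [List.length_modify, hlv, length_vadd, List.length_modify]; omega
    · intro j hj1 hj2
      have hjb : j < b.length := by
        have := List.length_modify (fun x : Int => x + 1) (vadd s b) (pvResolve b.length idx).toNat
        omega
      have hjs : j < s.length := by omega
      have hjm : j < (b.modify (pvResolve b.length idx).toNat (fun x => x + 1)).length := by
        rw [List.length_modify]; omega
      rw [List.getElem_modify]
      have hz1 : (vadd s b)[j]'(by omega) = s[j]'hjs + b[j]'hjb := by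
        simp [vadd, List.getElem_zipWith]
      have hz2 : (vadd s (b.modify (pvResolve b.length idx).toNat (fun x => x + 1)))[j]'hj2 =
          s[j]'hjs + (b.modify (pvResolve b.length idx).toNat (fun x => x + 1))[j]'hjm := by
        simp [vadd, List.getElem_zipWith]
      rw [hz2, List.getElem_modify, hz1]
      split <;> ring
  · rw [if_neg hcond, if_neg hcond]

lemma vadd_ZV (s : List Int) : vadd s (ZV s.length) = s := by
  induction s with
  | nil => rfl
  | cons a l ih => simpa [vadd, ZV, List.replicate_succ] using ih

-- ---------- translation: A's successor is vector addition of a delta ----------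

lemma fspA_inc_vadd (s b ins : List Int) (h : s.length = b.length) :
    fspA_inc (vadd s b) ins = vadd s (fspA_inc b ins) := by
  unfold fspA_inc
  induction ins generalizing b with
  | nil => rfl
  | cons a l ih =>
    simp only [List.foldl_cons]
    rw [pvIncAt_vadd s b a h, ih (pvIncAt b a) (by rw [length_pvIncAt]; exact h)]

lemma fspA_inc_eq_vadd (s ins : List Int) :
    fspA_inc s ins = vadd s (fspB_delta s.length ins) := by
  have h1 : fspB_delta s.length ins = fspA_inc (ZV s.length) ins := rfl
  have h2 := fspA_inc_vadd s (ZV s.length) ins (by simp [ZV])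
  rw [vadd_ZV] at h2
  rw [h1, ← h2]

-- ---------- VLe basics ----------

lemma VLe_refl (s : List Int) : VLe s s := ⟨rfl, fun _ _ => le_refl _⟩

lemma VLe_trans {s t u : List Int} (h1 : VLe s t) (h2 : VLe t u) : VLe s u := by
  obtain ⟨l1, p1⟩ := h1; obtain ⟨l2, p2⟩ := h2
  exact ⟨l1.trans l2, fun i hi => le_trans (p1 i hi) (p2 i (by omega))⟩

lemma VLe_vadd_right {s d : List Int} (hl : d.length = s.length) (hd : VNN d) :
    VLe s (vadd s d) := by
  refine ⟨by rw [length_vadd]; omega, fun i hi => ?_⟩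
  rw [getD_vadd s d i hi (by omega)]
  have : 0 ≤ d.getD i 0 := by
    rw [List.getD_eq_getElem _ _ (by omega : i < d.length)]
    exact hd _ (List.getElem_mem _)
  omega

lemma sum_vadd (s d : List Int) (h : s.length = d.length) :
    (vadd s d).sum = s.sum + d.sum := by
  unfold vadd
  induction s generalizing d with
  | nil => cases d with
    | nil => simp
    | cons b bs => simp at h
  | cons a as ih =>
    cases d with
    | nil => simp at h
    | cons b bs =>
      simp only [List.zipWith_cons_cons, List.sum_cons]
      rw [ih bs (by simpa using h)]; ring

lemma sum_ZV (n : Nat) : (ZV n).sum = 0 := by simp [ZV]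

lemma length_ZV (n : Nat) : (ZV n).length = n := by simp [ZV]

lemma getD_ZV (n j : Nat) : (ZV n).getD j 0 = 0 := by
  rw [List.getD_eq_getElem?_getD]
  cases h : (ZV n)[j]? with
  | none => rfl
  | some a =>
    have := List.mem_of_getElem? h
    simp [ZV] at this
    simp [this]

-- ---------- DReach theory ----------

lemma DReach_length {D : List (List Int)} {n : Nat} (hD : ∀ d ∈ D, d.length = n)
    {k : Nat} {s t : List Int} (hs : s.length = n) (h : DReach D k s t) : t.length = n := by
  induction h with
  | refl => exact hs
  | step d hd hr ih => rw [length_vadd, ih hs, hD d hd]; omega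

lemma DReach_mono {D : List (List Int)} {n : Nat} (hD : ∀ d ∈ D, d.length = n)
    (hDnn : ∀ d ∈ D, VNN d) {k : Nat} {s t : List Int} (hs : s.length = n)
    (h : DReach D k s t) : VLe s t := by
  induction h with
  | refl => exact VLe_refl _
  | step d hd hr ih =>
    refine VLe_trans (ih hs) (VLe_vadd_right ?_ (hDnn d hd))
    rw [hD d hd, DReach_length hD hs hr]

lemma DReach_headview {D : List (List Int)} {k : Nat} {s t : List Int}
    (h : DReach D k s t) :
    (k = 0 ∧ t = s) ∨ ∃ d ∈ D, ∃ k', k = k' + 1 ∧ DReach D k' (vadd s d) t := by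
  induction h with
  | refl => exact Or.inl ⟨rfl, rfl⟩
  | step d hd hr ih =>
    rcases ih with ⟨hk, hts⟩ | ⟨d₀, hd₀, k₀, hk₀, hr₀⟩
    · subst hts; subst hk
      exact Or.inr ⟨d, hd, 0, rfl, DReach.refl _⟩
    · subst hk₀
      exact Or.inr ⟨d₀, hd₀, k₀ + 1, rfl, DReach.step d hd hr₀⟩

lemma DReach_split {D : List (List Int)} {k : Nat} {s t : List Int}
    (h : DReach D k s t) : ∀ j ≤ k, ∃ u, DReach D j s u ∧ DReach D (k - j) u t := by
  induction h with
  | refl =>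
    intro j hj
    have hj0 : j = 0 := Nat.le_zero.mp hj
    subst hj0
    exact ⟨_, DReach.refl _, DReach.refl _⟩
  | @step k s u d hd hr ih =>
    intro j hj
    by_cases hjk : j ≤ k
    · rcases ih j hjk with ⟨w, hw1, hw2⟩
      refine ⟨w, hw1, ?_⟩
      have : k + 1 - j = (k - j) + 1 := by omega
      rw [this]
      exact DReach.step d hd hw2
    · have : j = k + 1 := by omega
      subst this
      exact ⟨vadd u d, DReach.step d hd hr, by simpa using DReach.refl _⟩

lemma DReach_sum_le {D : List (List Int)} {n : Nat} (hD : ∀ d ∈ D, d.length = n)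
    (hDs : ∀ d ∈ D, 1 ≤ d.sum) {k : Nat} {s t : List Int} (hs : s.length = n)
    (h : DReach D k s t) : s.sum + k ≤ t.sum := by
  induction h with
  | refl => simp
  | step d hd hr ih =>
    rw [sum_vadd _ _ (by rw [DReach_length hD hs hr, hD d hd])]
    have h1 := hDs d hd
    have h2 := ih hs
    push_cast
    push_cast at h2
    omega

lemma DReach_mono_D {D D' : List (List Int)} (hsub : ∀ d ∈ D, d ∈ D')
    {k : Nat} {s t : List Int} (h : DReach D k s t) : DReach D' k s t := by
  induction h with
  | refl => exact DReach.refl _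
  | step d hd hr ih => exact DReach.step d (hsub d hd) ih

lemma DReach_zero_iff {D : List (List Int)} {s t : List Int} :
    DReach D 0 s t ↔ t = s := by
  constructor
  · intro h; cases h; rfl
  · intro h; subst h; exact DReach.refl _

lemma vadd_zero_of_allzero {s d : List Int} (h : s.length = d.length)
    (hz : ∀ x ∈ d, x = 0) : vadd s d = s := by
  apply List.ext_getElem
  · rw [length_vadd]; omega
  · intro j hj1 hj2
    have hjd : j < d.length := by rw [length_vadd] at hj1; omega
    have : d[j]'hjd = 0 := hz _ (List.getElem_mem _)
    simp [vadd, List.getElem_zipWith, this]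

-- ---------- membership through the set-building folds ----------

lemma mem_foldl_process {α β : Type} [BEq α] [LawfulBEq α] (l : List β)
    (g : PySem.Set α → β → PySem.Set α) (P : β → α → Prop)
    (hg : ∀ acc b x, x ∈ g acc b ↔ x ∈ acc ∨ P b x) (s₀ : PySem.Set α) (x : α) :
    x ∈ l.foldl g s₀ ↔ x ∈ s₀ ∨ ∃ b ∈ l, P b x := by
  induction l generalizing s₀ with
  | nil => simp
  | cons a l ih =>
    simp only [List.foldl_cons]
    rw [ih]
    simp only [hg, List.mem_cons]
    constructor
    · rintro ((h | h) | ⟨b, hb, h⟩)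
      · exact Or.inl h
      · exact Or.inr ⟨a, Or.inl rfl, h⟩
      · exact Or.inr ⟨b, Or.inr hb, h⟩
    · rintro (h | ⟨b, (rfl | hb), h⟩)
      · exact Or.inl (Or.inl h)
      · exact Or.inl (Or.inr h)
      · exact Or.inr ⟨b, hb, h⟩

lemma mem_fspB_deltas (n : Nat) (I : List (List Int)) (x : List Int) :
    x ∈ fspB_deltas n I ↔
      ∃ ins ∈ I, (fspB_delta n ins).any (fun v => decide (v ≠ 0)) = true ∧ x = fspB_delta n ins := by
  unfold fspB_deltas
  rw [mem_foldl_process (P := fun ins x =>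
        (fspB_delta n ins).any (fun v => decide (v ≠ 0)) = true ∧ x = fspB_delta n ins)]
  · simp [PySem.Set.empty]
  · intro acc b x
    by_cases hc : (fspB_delta n b).any (fun v => decide (v ≠ 0)) = true
    · rw [if_pos hc, PySem.Set.mem_add]
      constructor
      · rintro (h | h)
        · exact Or.inl h
        · exact Or.inr ⟨hc, h⟩
      · rintro (h | ⟨_, h⟩)
        · exact Or.inl h
        · exact Or.inr h
    · rw [if_neg hc]
      constructor
      · exact fun h => Or.inl h
      · rintro (h | ⟨hc', _⟩)
        · exact h
        · exact absurd hc' hc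

lemma mem_fspB_step (g : List Int) (ds fr : PySem.Set (List Int)) (x : List Int) :
    x ∈ fspB_step g ds fr ↔
      ∃ s ∈ fr, ∃ d ∈ ds,
        ((List.range g.length).all (fun i => decide ((vadd s d).getD i 0 ≤ g.getD i 0)) = true) ∧
        x = vadd s d := by
  have hadd : ∀ (acc' : PySem.Set (List Int)) (s d x' : List Int),
      x' ∈ (if ((List.range g.length).all (fun i => decide ((vadd s d).getD i 0 ≤ g.getD i 0)) = true)
            then PySem.Set.add acc' (vadd s d) else acc') ↔
      x' ∈ acc' ∨ (((List.range g.length).all (fun i => decide ((vadd s d).getD i 0 ≤ g.getD i 0)) = true) ∧ x' = vadd s d) := by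
    intro acc' s d x'
    by_cases hc : ((List.range g.length).all (fun i => decide ((vadd s d).getD i 0 ≤ g.getD i 0)) = true)
    · rw [if_pos hc, PySem.Set.mem_add]
      constructor
      · rintro (h | h)
        · exact Or.inl h
        · exact Or.inr ⟨hc, h⟩
      · rintro (h | ⟨_, h⟩)
        · exact Or.inl h
        · exact Or.inr h
    · rw [if_neg hc]
      constructor
      · exact fun h => Or.inl h
      · rintro (h | ⟨hc', _⟩)
        · exact h
        · exact absurd hc' hc
  have hinner : ∀ (s : List Int) (acc : PySem.Set (List Int)) (x' : List Int),
      x' ∈ ds.foldl (fun acc d =>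
        let t := List.zipWith (fun a b => a + b) s d
        if (List.range g.length).all (fun i => decide (t.getD i 0 ≤ g.getD i 0))
        then PySem.Set.add acc t else acc) acc ↔
      x' ∈ acc ∨ ∃ d ∈ ds,
        ((List.range g.length).all (fun i => decide ((vadd s d).getD i 0 ≤ g.getD i 0)) = true) ∧
        x' = vadd s d := by
    intro s acc x'
    rw [mem_foldl_process ds _ (fun d x' =>
        ((List.range g.length).all (fun i => decide ((vadd s d).getD i 0 ≤ g.getD i 0)) = true) ∧
        x' = vadd s d)]
    intro acc' d y
    exact hadd acc' s d y
  unfold fspB_step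
  rw [mem_foldl_process fr _ (fun s x => ∃ d ∈ ds,
        ((List.range g.length).all (fun i => decide ((vadd s d).getD i 0 ≤ g.getD i 0)) = true) ∧
        x = vadd s d)]
  · simp [PySem.Set.empty]
  · intro acc s y
    exact hinner s acc y

-- ---------- the Bool conditions of the ports, as VLe ----------

lemma all_range_iff_VLe (g t : List Int) (h : t.length = g.length) :
    ((List.range g.length).all (fun i => decide (t.getD i 0 ≤ g.getD i 0)) = true) ↔ VLe t g := by
  rw [List.all_eq_true]
  constructor
  · intro hall
    exact ⟨h, fun i hi => by simpa using hall i (by simpa [h] using hi)⟩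
  · intro ⟨_, hp⟩ i hi
    simp only [List.mem_range] at hi
    simpa using hp i (by omega)

lemma any_range_false_iff_VLe (g ns : List Int) (h : ns.length = g.length) :
    (((List.range ns.length).any (fun i => decide (g.getD i 0 < ns.getD i 0))) = false) ↔ VLe ns g := by
  rw [← Bool.not_eq_true, List.any_eq_true]
  constructor
  · intro hno
    refine ⟨h, fun i hi => ?_⟩
    by_contra hlt
    exact hno ⟨i, List.mem_range.mpr hi, decide_eq_true (by omega)⟩
  · rintro ⟨_, hp⟩ ⟨i, hi, hgt⟩
    simp only [List.mem_range] at hi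
    have h1 := hp i hi
    have h2 := of_decide_eq_true hgt
    omega

-- ---------- properties of the delta set ----------

lemma any_ne_zero_sum (d : List Int) (hnn : VNN d)
    (h : d.any (fun v => decide (v ≠ 0)) = true) : 1 ≤ d.sum := by
  rw [List.any_eq_true] at h
  rcases h with ⟨x, hx, hxne⟩
  have h1 := hnn _ hx
  have h2 := List.single_le_sum hnn _ hx
  simp at hxne
  omega

lemma not_any_ne_zero (d : List Int) (h : ¬ (d.any (fun v => decide (v ≠ 0)) = true)) :
    ∀ x ∈ d, x = 0 := by
  intro x hx
  by_contra hne
  exact h (List.any_eq_true.mpr ⟨x, hx, by simpa using hne⟩)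

lemma deltasA_mem (g : List Int) (I : List (List Int)) (d : List Int) (hd : d ∈ deltasA g I) :
    d.length = g.length ∧ VNN d := by
  unfold deltasA at hd
  rcases List.mem_map.mp hd with ⟨ins, _, rfl⟩
  exact ⟨length_fspB_delta _ _, VNN_fspB_delta _ _⟩

lemma fspB_deltas_sub (g : List Int) (I : List (List Int)) :
    ∀ d ∈ fspB_deltas g.length I, d ∈ deltasA g I := by
  intro d hd
  rcases (mem_fspB_deltas _ _ _).mp hd with ⟨ins, hins, _, rfl⟩
  exact List.mem_map.mpr ⟨ins, hins, rfl⟩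

lemma fspB_deltas_spec (g : List Int) (I : List (List Int)) :
    ∀ d ∈ fspB_deltas g.length I, d.length = g.length ∧ VNN d ∧ 1 ≤ d.sum := by
  intro d hd
  have hA := deltasA_mem g I d (fspB_deltas_sub g I d hd)
  rcases (mem_fspB_deltas _ _ _).mp hd with ⟨ins, _, hany, rfl⟩
  exact ⟨hA.1, hA.2, any_ne_zero_sum _ hA.2 hany⟩

-- all-zero goal ↔ goal = ZV
lemma allzero_iff (g : List Int) : (g.all (fun v => decide (v = 0)) = true) ↔ g = ZV g.length := by
  rw [List.all_eq_true, ZV, List.eq_replicate_iff]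
  simp

-- the two reachability relations have the same reachability levels up to dropping zero deltas
lemma reach_transfer (g : List Int) (I : List (List Int)) :
    (∀ k, DReach (fspB_deltas g.length I) k (ZV g.length) g → DReach (deltasA g I) k (ZV g.length) g) ∧
    (∀ k, DReach (deltasA g I) k (ZV g.length) g → ∃ k' ≤ k, DReach (fspB_deltas g.length I) k' (ZV g.length) g) := by
  constructor
  · intro k h
    exact DReach_mono_D (fspB_deltas_sub g I) h
  · have main : ∀ (k : Nat) (s t : List Int), s.length = g.length → DReach (deltasA g I) k s t →
        ∃ k' ≤ k, DReach (fspB_deltas g.length I) k' s t := by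
      intro k s t hs h
      induction h with
      | refl => exact ⟨0, le_refl _, DReach.refl _⟩
      | @step k' s' u d hd hr ih =>
        rcases ih hs with ⟨k₀, hk₀, hr₀⟩
        by_cases hany : (d.any (fun v => decide (v ≠ 0)) = true)
        · unfold deltasA at hd
          rcases List.mem_map.mp hd with ⟨ins, hins, rfl⟩
          have hmem : fspB_delta g.length ins ∈ fspB_deltas g.length I :=
            (mem_fspB_deltas _ _ _).mpr ⟨ins, hins, hany, rfl⟩
          exact ⟨k₀ + 1, by omega, DReach.step _ hmem hr₀⟩
        · have hz := not_any_ne_zero d hany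
          have hul : u.length = g.length :=
            DReach_length (fun d' hd' => (deltasA_mem g I d' hd').1) hs hr
          have hdl : d.length = g.length := (deltasA_mem g I d hd).1
          rw [vadd_zero_of_allzero (by omega) hz]
          exact ⟨k₀, by omega, hr₀⟩
    exact fun k h => main k (ZV g.length) g (length_ZV _) h

-- ---------- cardinality of the box ----------

def encB : List Int → List Int → Nat
  | _, [] => 0
  | [], _ :: _ => 0
  | x :: xs, gy :: gs => x.toNat + (gy.toNat + 1) * encB xs gs

lemma InBox_cons {g s : List Int} {gy x : Int} (h : InBox (gy :: g) (x :: s)) :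
    (0 ≤ x ∧ x ≤ (gy.toNat : Int)) ∧ InBox g s := by
  obtain ⟨hl, hp⟩ := h
  refine ⟨by simpa using hp 0 (by simp), by simpa using hl, fun i hi => ?_⟩
  simpa using hp (i + 1) (by simp; omega)

lemma encB_lt (g : List Int) : ∀ s, InBox g s → encB s g < ((g.map (fun y => y.toNat + 1)).prod) := by
  induction g with
  | nil =>
    intro s hs
    have : s = [] := List.length_eq_zero_iff.mp hs.1
    subst this; simp [encB]
  | cons gy gs ih =>
    intro s hs
    cases s with
    | nil => simp [InBox] at hs
    | cons x xs =>
      obtain ⟨⟨hx0, hxle⟩, hbox⟩ := InBox_cons hs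
      have he := ih xs hbox
      have hxN : x.toNat ≤ gy.toNat := by omega
      simp only [encB, List.map_cons, List.prod_cons]
      calc x.toNat + (gy.toNat + 1) * encB xs gs
          ≤ gy.toNat + (gy.toNat + 1) * encB xs gs := by omega
        _ < (gy.toNat + 1) * (encB xs gs + 1) := by ring_nf; omega
        _ ≤ (gy.toNat + 1) * (gs.map (fun y => y.toNat + 1)).prod :=
            Nat.mul_le_mul_left _ (by omega)

lemma encB_inj (g : List Int) : ∀ s t, InBox g s → InBox g t → encB s g = encB t g → s = t := by
  induction g with
  | nil =>
    intro s t hs ht _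
    rw [List.length_eq_zero_iff.mp hs.1, List.length_eq_zero_iff.mp ht.1]
  | cons gy gs ih =>
    intro s t hs ht he
    cases s with
    | nil => simp [InBox] at hs
    | cons x xs =>
      cases t with
      | nil => simp [InBox] at ht
      | cons y ys =>
        obtain ⟨⟨hx0, hxle⟩, hsbox⟩ := InBox_cons hs
        obtain ⟨⟨hy0, hyle⟩, htbox⟩ := InBox_cons ht
        simp only [encB] at he
        have hxN : x.toNat < gy.toNat + 1 := by omega
        have hyN : y.toNat < gy.toNat + 1 := by omega
        have hmx : (x.toNat + (gy.toNat + 1) * encB xs gs) % (gy.toNat + 1) = x.toNat := by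
          rw [Nat.add_mul_mod_self_left, Nat.mod_eq_of_lt hxN]
        have hmy : (y.toNat + (gy.toNat + 1) * encB ys gs) % (gy.toNat + 1) = y.toNat := by
          rw [Nat.add_mul_mod_self_left, Nat.mod_eq_of_lt hyN]
        have hxy : x.toNat = y.toNat := by rw [← hmx, ← hmy, he]
        have hxyi : x = y := by omega
        have hee : encB xs gs = encB ys gs := by
          have := he
          rw [hxy] at this
          have h2 : (gy.toNat + 1) * encB xs gs = (gy.toNat + 1) * encB ys gs := by omega
          exact Nat.eq_of_mul_eq_mul_left (by omega) h2
        rw [hxyi, ih xs ys hsbox htbox hee]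

lemma card_box (g : List Int) (v : List (List Int)) (hnd : v.Nodup)
    (hbox : ∀ s ∈ v, InBox g s) : v.length ≤ (g.map (fun y => y.toNat + 1)).prod := by
  have hm : (v.map (fun s => encB s g)).Nodup :=
    hnd.map_on (fun x hx y hy he => encB_inj g x y (hbox x hx) (hbox y hy) he)
  have hsub : (v.map (fun s => encB s g)).toFinset ⊆
      Finset.range ((g.map (fun y => y.toNat + 1)).prod) := by
    intro a ha
    simp only [List.mem_toFinset, List.mem_map] at ha
    rcases ha with ⟨s, hs, rfl⟩
    simp only [Finset.mem_range]
    exact encB_lt g s (hbox s hs)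
  calc v.length = (v.map (fun s => encB s g)).length := by rw [List.length_map]
    _ = (v.map (fun s => encB s g)).toFinset.card := (List.toFinset_card_of_nodup hm).symm
    _ ≤ (Finset.range ((g.map (fun y => y.toNat + 1)).prod)).card := Finset.card_le_card hsub
    _ = (g.map (fun y => y.toNat + 1)).prod := Finset.card_range _

-- ---------- B's loop computes the minimal level ----------

lemma B_loop_main (g : List Int) (D : PySem.Set (List Int))
    (hgz : g ≠ ZV g.length)
    (hD : ∀ d ∈ D, d.length = g.length ∧ VNN d ∧ 1 ≤ d.sum) :
    ∀ (count : Nat) (dep : Int) (fr : PySem.Set (List Int)),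
    1 ≤ dep →
    g.sum + 1 - dep ≤ (count : Int) →
    (∀ t, t ∈ fr → DReach D (dep - 1).toNat (ZV g.length) t) →
    (∀ t, DReach D (dep - 1).toNat (ZV g.length) t → VLe t g → t ∈ fr) →
    (∀ j : Nat, (j : Int) < dep → ¬ DReach D j (ZV g.length) g) →
    IsAns (fun k => DReach D k (ZV g.length) g) (fspB_loop g D count dep fr) := by
  have hDl : ∀ d ∈ D, d.length = g.length := fun d hd => (hD d hd).1
  have hDnn : ∀ d ∈ D, VNN d := fun d hd => (hD d hd).2.1
  have hDs : ∀ d ∈ D, 1 ≤ d.sum := fun d hd => (hD d hd).2.2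
  intro count
  induction count with
  | zero =>
    intro dep fr h1 hc hin1 hin2 hnh
    unfold fspB_loop
    left
    refine ⟨rfl, fun k hk => ?_⟩
    by_cases hklt : (k : Int) < dep
    · exact hnh k hklt hk
    · have hb := DReach_sum_le hDl hDs (length_ZV _) hk
      rw [sum_ZV] at hb
      simp only [Nat.cast_zero] at hc
      omega
  | succ count ihc =>
    intro dep fr h1 hc hin1 hin2 hnh
    unfold fspB_loop
    by_cases hfe : fr.isEmpty
    · rw [if_pos hfe]
      left
      refine ⟨rfl, fun k hk => ?_⟩
      have hfrnil : fr = [] := List.isEmpty_iff.mp hfe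
      by_cases hklt : (k : Int) < dep
      · exact hnh k hklt hk
      · have hkd : (dep - 1).toNat ≤ k := by omega
        rcases DReach_split hk _ hkd with ⟨u, hu1, hu2⟩
        have hul : u.length = g.length := DReach_length hDl (length_ZV _) hu1
        have hug : VLe u g := VLe_trans (DReach_mono hDl hDnn hul hu2) (VLe_refl g)
        have := hin2 u hu1 hug
        rw [hfrnil] at this
        simp at this
    · rw [if_neg hfe]
      have hfr'1 : ∀ t, t ∈ fspB_step g D fr → DReach D dep.toNat (ZV g.length) t := by
        intro t ht
        rcases (mem_fspB_step g D fr t).mp ht with ⟨s, hs, d, hd, _, rfl⟩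
        have := DReach.step d hd (hin1 s hs)
        have hcast : (dep - 1).toNat + 1 = dep.toNat := by omega
        rwa [hcast] at this
      have hfr'2 : ∀ t, DReach D dep.toNat (ZV g.length) t → VLe t g → t ∈ fspB_step g D fr := by
        intro t ht hle
        have hk0 : dep.toNat = (dep - 1).toNat + 1 := by omega
        rw [hk0] at ht
        cases ht with
        | step d hd hr =>
          rename_i u
          have hul : u.length = g.length := DReach_length hDl (length_ZV _) hr
          have hut : VLe u (vadd u d) := VLe_vadd_right (by rw [hDl d hd, hul]) (hDnn d hd)
          have hug : VLe u g := VLe_trans hut hle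
          have hmem := hin2 u hr hug
          refine (mem_fspB_step g D fr _).mpr ⟨u, hmem, d, hd, ?_, rfl⟩
          refine (all_range_iff_VLe g (vadd u d) ?_).mpr hle
          rw [length_vadd, hul, hDl d hd]; omega
      by_cases hcont : PySem.Set.contains (fspB_step g D fr) g
      · rw [if_pos hcont]
        right
        refine ⟨dep.toNat, by omega, ?_, ?_⟩
        · exact hfr'1 g ((PySem.Set.contains_iff _ _).mp hcont)
        · intro k hk
          by_cases hklt : (k : Int) < dep
          · exact absurd hk (hnh k hklt)
          · omega
      · rw [if_neg hcont]
        refine ihc (dep + 1) (fspB_step g D fr) (by omega) (by push_cast at hc ⊢; omega) ?_ ?_ ?_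
        · intro t ht
          have hcast : (dep + 1 - 1).toNat = dep.toNat := by omega
          rw [hcast]
          exact hfr'1 t ht
        · intro t ht hle
          have hcast : (dep + 1 - 1).toNat = dep.toNat := by omega
          rw [hcast] at ht
          exact hfr'2 t ht hle
        · intro j hj
          by_cases hjlt : (j : Int) < dep
          · exact hnh j hjlt
          · have hjd : j = dep.toNat := by omega
            subst hjd
            intro hreach
            exact hcont ((PySem.Set.contains_iff _ _).mpr (hfr'2 g hreach (VLe_refl g)))

lemma B_answers (g : List Int) (I : List (List Int)) :
    IsAns (fun k => DReach (fspB_deltas g.length I) k (ZV g.length) g)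
      (find_shortest_path_to_joltage_state_alt g I) := by
  unfold find_shortest_path_to_joltage_state_alt
  by_cases hz : g.all (fun v => decide (v = 0)) = true
  · rw [if_pos hz]
    right
    exact ⟨0, rfl, DReach_zero_iff.mpr ((allzero_iff g).mp hz), fun k _ => Nat.zero_le k⟩
  · rw [if_neg hz]
    have hgz : g ≠ ZV g.length := fun h => hz ((allzero_iff g).mpr h)
    refine B_loop_main g (fspB_deltas g.length I) hgz (fspB_deltas_spec g I) g.sum.toNat 1
      (PySem.Set.ofList [List.replicate g.length 0]) (by omega)
      (by have := Int.self_le_toNat g.sum; omega) ?_ ?_ ?_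
    · intro t ht
      have : t = ZV g.length := by
        have := (PySem.Set.mem_ofList _ _).mp ht
        simpa [ZV] using this
      subst this
      simpa using DReach.refl (ZV g.length)
    · intro t ht _
      have : t = ZV g.length := by
        have h0 : ((1 : Int) - 1).toNat = 0 := by omega
        rw [h0] at ht
        exact DReach_zero_iff.mp ht
      subst this
      exact (PySem.Set.mem_ofList _ _).mpr (by simp [ZV])
    · intro j hj hreach
      have : j = 0 := by omega
      subst this
      exact hgz (DReach_zero_iff.mp hreach)

-- ---------- A-side auxiliary facts ----------

def boxP (g : List Int) : Nat := (g.map (fun y => y.toNat + 1)).prod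

lemma InBox_ZV (g : List Int) : InBox g (ZV g.length) := by
  refine ⟨length_ZV _, fun i hi => ?_⟩
  rw [getD_ZV]
  exact ⟨le_refl _, by positivity⟩

lemma InBox_of_step {g state t : List Int} (hb : InBox g state) (hst : VLe state t)
    (htg : VLe t g) : InBox g t := by
  obtain ⟨hl1, hp1⟩ := hb; obtain ⟨hl2, hp2⟩ := hst; obtain ⟨hl3, hp3⟩ := htg
  refine ⟨by omega, fun i hi => ?_⟩
  have h1 := hp1 i (by omega)
  have h2 := hp2 i (by omega)
  have h3 := hp3 i (by omega)
  have h4 := Int.self_le_toNat (g.getD i 0)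
  exact ⟨by omega, by omega⟩

lemma vle_inc (state ins : List Int) : VLe state (fspA_inc state ins) := by
  rw [fspA_inc_eq_vadd]
  exact VLe_vadd_right (length_fspB_delta _ _) (VNN_fspB_delta _ _)

lemma inc_translate {g : List Int} {I : List (List Int)} {ins : List Int} (hins : ins ∈ I)
    {s : List Int} (hs : s.length = g.length) :
    fspA_inc s ins = vadd s (fspB_delta g.length ins) ∧ fspB_delta g.length ins ∈ deltasA g I := by
  constructor
  · rw [fspA_inc_eq_vadd, hs]
  · exact List.mem_map.mpr ⟨ins, hins, rfl⟩

lemma deltasA_len (g : List Int) (I : List (List Int)) :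
    ∀ d ∈ deltasA g I, d.length = g.length := fun d hd => (deltasA_mem g I d hd).1

lemma deltasA_nn (g : List Int) (I : List (List Int)) :
    ∀ d ∈ deltasA g I, VNN d := fun d hd => (deltasA_mem g I d hd).2

lemma eq_false_of_not_true {b : Bool} (h : ¬ b = true) : b = false := by
  cases b
  · rfl
  · exact absurd rfl h

-- ---------- the enqueue fold, described ----------

lemma fspA_enqueue_spec (g : List Int) (I : List (List Int)) (state : List Int) (index : Int)
    (visited : PySem.Set (List Int)) (q₀ : List (List Int × Int)) (hst : state.length = g.length) :
    ∃ ne : List (List Int × Int),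
      fspA_enqueue g I state index visited q₀ = q₀ ++ ne ∧
      ne.length ≤ I.length ∧
      (∀ e ∈ ne, (∃ ins ∈ I, e.1 = fspA_inc state ins) ∧ e.2 = index + 1 ∧ VLe e.1 g ∧ e.1 ∉ visited) ∧
      (∀ ins ∈ I, VLe (fspA_inc state ins) g → fspA_inc state ins ∉ visited →
        (fspA_inc state ins, index + 1) ∈ ne) := by
  unfold fspA_enqueue
  induction I generalizing q₀ with
  | nil => exact ⟨[], by simp, by simp, by simp, by simp⟩
  | cons ins I ih =>
    simp only [List.foldl_cons]
    have hlen : (fspA_inc state ins).length = g.length := by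
      rw [length_fspA_inc]; exact hst
    by_cases hc1 : ((List.range (fspA_inc state ins).length).any
        (fun i => decide (g.getD i 0 < (fspA_inc state ins).getD i 0))) = true
    · rw [if_pos hc1]
      rcases ih q₀ with ⟨ne, heq, hle, hmem, hcov⟩
      refine ⟨ne, heq, by simpa using Nat.le_succ_of_le hle, ?_, ?_⟩
      · intro e he
        rcases hmem e he with ⟨⟨ins', hins', h1⟩, h2, h3, h4⟩
        exact ⟨⟨ins', List.mem_cons_of_mem _ hins', h1⟩, h2, h3, h4⟩
      · intro ins' hins' hvle hnv
        rcases List.mem_cons.mp hins' with rfl | hins'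
        · have hfa := (any_range_false_iff_VLe g _ hlen).mpr hvle
          rw [hfa] at hc1
          exact absurd hc1 (by simp)
        · exact hcov ins' hins' hvle hnv
    · rw [if_neg hc1]
      have hvle : VLe (fspA_inc state ins) g :=
        (any_range_false_iff_VLe g _ hlen).mp (eq_false_of_not_true hc1)
      by_cases hc2 : PySem.Set.contains visited (fspA_inc state ins) = true
      · rw [if_pos hc2]
        have hinv : fspA_inc state ins ∈ visited := (PySem.Set.contains_iff _ _).mp hc2
        rcases ih q₀ with ⟨ne, heq, hle, hmem, hcov⟩
        refine ⟨ne, heq, by simpa using Nat.le_succ_of_le hle, ?_, ?_⟩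
        · intro e he
          rcases hmem e he with ⟨⟨ins', hins', h1⟩, h2, h3, h4⟩
          exact ⟨⟨ins', List.mem_cons_of_mem _ hins', h1⟩, h2, h3, h4⟩
        · intro ins' hins' hvle' hnv
          rcases List.mem_cons.mp hins' with rfl | hins'
          · exact absurd hinv hnv
          · exact hcov ins' hins' hvle' hnv
      · rw [if_neg hc2]
        have hninv : fspA_inc state ins ∉ visited := fun h => hc2 ((PySem.Set.contains_iff _ _).mpr h)
        rcases ih (q₀ ++ [(fspA_inc state ins, index + 1)]) with ⟨ne, heq, hle, hmem, hcov⟩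
        refine ⟨(fspA_inc state ins, index + 1) :: ne, by rw [heq]; simp, by simpa using hle, ?_, ?_⟩
        · intro e he
          rcases List.mem_cons.mp he with rfl | he
          · exact ⟨⟨ins, List.mem_cons_self, rfl⟩, rfl, hvle, hninv⟩
          · rcases hmem e he with ⟨⟨ins', hins', h1⟩, h2, h3, h4⟩
            exact ⟨⟨ins', List.mem_cons_of_mem _ hins', h1⟩, h2, h3, h4⟩
        · intro ins' hins' hvle' hnv
          rcases List.mem_cons.mp hins' with rfl | hins'
          · exact List.mem_cons_self
          · exact List.mem_cons_of_mem _ (hcov ins' hins' hvle' hnv)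

-- ---------- walking a path to the first unvisited vertex ----------

lemma walk (g : List Int) (I : List (List Int)) (q : List (List Int × Int)) (v : List (List Int))
    (hvlen : ∀ u ∈ v, u.length = g.length)
    (hvsucc : ∀ u ∈ v, ∀ ins ∈ I, VLe (fspA_inc u ins) g →
      (fspA_inc u ins ∈ v ∨ ∃ i, (fspA_inc u ins, i) ∈ q)) :
    ∀ (l : Nat) (s t : List Int), DReach (deltasA g I) l s t → s ∈ v → t ∉ v → VLe t g →
      ∃ u i l', ((u, i) ∈ q) ∧ u ∉ v ∧ DReach (deltasA g I) l' u t ∧ l' < l := by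
  intro l
  induction l using Nat.strong_induction_on with
  | _ l ihl =>
    intro s t hreach hs ht hle
    rcases DReach_headview hreach with ⟨_, rfl⟩ | ⟨d, hd, l₀, rfl, hr⟩
    · exact absurd hs ht
    · rcases List.mem_map.mp hd with ⟨ins, hins, rfl⟩
      have hsl : s.length = g.length := hvlen s hs
      have htr := (inc_translate hins hsl).1
      have hs₁l : (vadd s (fspB_delta g.length ins)).length = g.length := by
        rw [length_vadd, hsl, length_fspB_delta]; omega
      have hs₁g : VLe (vadd s (fspB_delta g.length ins)) g :=
        VLe_trans (DReach_mono (deltasA_len g I) (deltasA_nn g I) hs₁l hr) hle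
      by_cases hs₁v : vadd s (fspB_delta g.length ins) ∈ v
      · rcases ihl l₀ (by omega) _ t hr hs₁v ht hle with ⟨u, i, l'', hq, hu, hr'', hlt⟩
        exact ⟨u, i, l'', hq, hu, hr'', by omega⟩
      · rcases hvsucc s hs ins hins (by rwa [htr]) with hin | ⟨i, hq⟩
        · rw [htr] at hin; exact absurd hin hs₁v
        · rw [htr] at hq
          exact ⟨_, i, l₀, hq, hs₁v, hr, by omega⟩

-- ---------- the BFS loop invariant ----------

structure AInv (g : List Int) (I : List (List Int)) (q : List (List Int × Int))
    (v : List (List Int)) : Prop where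
  qbox : ∀ e ∈ q, InBox g e.1
  qreach : ∀ e ∈ q, ∃ k : Nat, e.2 = (k : Int) ∧ DReach (deltasA g I) k (ZV g.length) e.1
  qwin : List.Pairwise (fun e f : List Int × Int => e.2 ≤ f.2 ∧ f.2 ≤ e.2 + 1) q
  vnodup : v.Nodup
  vbox : ∀ s ∈ v, InBox g s
  vng : g ∉ v
  vsucc : ∀ u ∈ v, ∀ ins ∈ I, VLe (fspA_inc u ins) g →
    (fspA_inc u ins ∈ v ∨ ∃ i, (fspA_inc u ins, i) ∈ q)
  comp : ∀ (k : Nat) (t : List Int), DReach (deltasA g I) k (ZV g.length) t → VLe t g → t ∉ v →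
    ∃ s i l, ((s, i) ∈ q) ∧ DReach (deltasA g I) l s t ∧ i + (l : Int) ≤ (k : Int)

lemma A_main (g : List Int) (I : List (List Int)) (fuel : Nat) :
    ∀ (q : List (List Int × Int)) (v : PySem.Set (List Int)),
    AInv g I q v →
    q.length + (I.length + 1) * (boxP g - v.length) + 1 ≤ fuel →
    IsAns (fun k => DReach (deltasA g I) k (ZV g.length) g) (fspA_loop g I fuel q v) := by
  induction fuel with
  | zero => intro q v _ hfuel; omega
  | succ fuel ih =>
    intro q v hinv hfuel
    cases q with
    | nil =>
      unfold fspA_loop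
      left
      refine ⟨rfl, fun k hk => ?_⟩
      rcases hinv.comp k g hk (VLe_refl g) hinv.vng with ⟨s, i, l, hq, _, _⟩
      simp at hq
    | cons e rest =>
      obtain ⟨state, index⟩ := e
      unfold fspA_loop
      have hwin := List.pairwise_cons.mp hinv.qwin
      by_cases hvis : PySem.Set.contains v state = true
      · rw [if_pos hvis]
        have hsv : state ∈ v := (PySem.Set.contains_iff _ _).mp hvis
        refine ih rest v ⟨?_, ?_, hwin.2, hinv.vnodup, hinv.vbox, hinv.vng, ?_, ?_⟩ (by
          simp only [List.length_cons] at hfuel; omega)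
        · exact fun e he => hinv.qbox e (List.mem_cons_of_mem _ he)
        · exact fun e he => hinv.qreach e (List.mem_cons_of_mem _ he)
        · -- vsucc for rest
          intro u hu ins hins hle
          rcases hinv.vsucc u hu ins hins hle with hin | ⟨i, hq⟩
          · exact Or.inl hin
          · rcases List.mem_cons.mp hq with heq | hrest
            · have : fspA_inc u ins = state := congrArg Prod.fst heq
              rw [this]; exact Or.inl hsv
            · exact Or.inr ⟨i, hrest⟩
        · -- comp for rest
          intro k t hreach hle htv
          rcases hinv.comp k t hreach hle htv with ⟨s, i, l, hq, hr, hbound⟩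
          rcases List.mem_cons.mp hq with heq | hrest
          · have hs_eq : s = state := congrArg Prod.fst heq
            have hi_eq : i = index := congrArg Prod.snd heq
            rw [hs_eq] at hr
            rw [hi_eq] at hbound
            have hvlen : ∀ u ∈ v, u.length = g.length := fun u hu => (hinv.vbox u hu).1
            rcases walk g I ((state, index) :: rest) v hvlen hinv.vsucc l state t hr hsv htv hle
              with ⟨u, i', l'', hq', hu, hr'', hlt⟩
            rcases List.mem_cons.mp hq' with heq' | hrest'
            · have hu_eq : u = state := congrArg Prod.fst heq'
              rw [hu_eq] at hu; exact absurd hsv hu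
            · have hw := hwin.1 _ hrest'
              refine ⟨u, i', l'', hrest', hr'', ?_⟩
              simp only at hw
              have hcl : (l'' : Int) < (l : Int) := by exact_mod_cast hlt
              omega
          · exact ⟨s, i, l, hrest, hr, hbound⟩
      · rw [if_neg hvis]
        have hstv : state ∉ v := fun h => hvis ((PySem.Set.contains_iff _ _).mpr h)
        have hbox : InBox g state := hinv.qbox (state, index) List.mem_cons_self
        have hstl : state.length = g.length := hbox.1
        rcases hinv.qreach (state, index) List.mem_cons_self with ⟨k₀, hk₀, hr₀⟩
        simp only at hk₀ hr₀
        by_cases hgoal : state = g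
        · rw [if_pos hgoal]
          right
          refine ⟨k₀, hk₀, hgoal ▸ hr₀, fun k hk => ?_⟩
          rcases hinv.comp k g hk (VLe_refl g) hinv.vng with ⟨s, i, l, hq, hr, hbound⟩
          have hidx : index ≤ i := by
            rcases List.mem_cons.mp hq with heq | hrest
            · have hi_eq : i = index := congrArg Prod.snd heq
              omega
            · exact (hwin.1 _ hrest).1
          have hl0 : (0 : Int) ≤ (l : Int) := by positivity
          omega
        · rw [if_neg hgoal]
          have hv' : PySem.Set.add v state = v ++ [state] := PySem.Set.add_of_not_mem hstv
          rcases fspA_enqueue_spec g I state index (PySem.Set.add v state) rest hstl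
            with ⟨ne, heq, hnelen, hnemem, hnecov⟩
          rw [heq]
          -- facts about new entries
          have hne2 : ∀ e ∈ ne, e.2 = index + 1 := fun e he => (hnemem e he).2.1
          have hnebox : ∀ e ∈ ne, InBox g e.1 := by
            intro e he
            rcases hnemem e he with ⟨⟨ins, hins, h1⟩, _, h3, _⟩
            exact InBox_of_step hbox (by rw [h1]; exact vle_inc state ins) h3
          have hmemv' : ∀ x, x ∈ PySem.Set.add v state ↔ x ∈ v ∨ x = state := by
            intro x; exact PySem.Set.mem_add v state x
          -- window bound on the whole new queue
          have hqwin' : ∀ e ∈ rest ++ ne, index ≤ e.2 ∧ e.2 ≤ index + 1 := by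
            intro e he
            rcases List.mem_append.mp he with h | h
            · exact hwin.1 _ h
            · rw [hne2 e h]; omega
          -- vsucc for the new state
          have hvsucc' : ∀ u ∈ PySem.Set.add v state, ∀ ins ∈ I, VLe (fspA_inc u ins) g →
              (fspA_inc u ins ∈ PySem.Set.add v state ∨ ∃ i, (fspA_inc u ins, i) ∈ rest ++ ne) := by
            intro u hu ins hins hle
            rcases (hmemv' u).mp hu with huv | hust
            · rcases hinv.vsucc u huv ins hins hle with hin | ⟨i, hq⟩
              · exact Or.inl ((hmemv' _).mpr (Or.inl hin))
              · rcases List.mem_cons.mp hq with heq' | hrest'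
                · have : fspA_inc u ins = state := congrArg Prod.fst heq'
                  exact Or.inl ((hmemv' _).mpr (Or.inr this))
                · exact Or.inr ⟨i, List.mem_append.mpr (Or.inl hrest')⟩
            · subst hust
              by_cases hin : fspA_inc u ins ∈ PySem.Set.add v u
              · exact Or.inl hin
              · exact Or.inr ⟨index + 1, List.mem_append.mpr (Or.inr (hnecov ins hins hle hin))⟩
          have hvlen' : ∀ u ∈ PySem.Set.add v state, u.length = g.length := by
            intro u hu
            rcases (hmemv' u).mp hu with huv | rfl
            · exact (hinv.vbox u huv).1
            · exact hstl
          have hlenv' : (PySem.Set.add v state).length = v.length + 1 := by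
            rw [hv', List.length_append, List.length_cons, List.length_nil]
          have hnodup' : (PySem.Set.add v state).Nodup := PySem.Set.nodup_add v state hinv.vnodup
          have hvbox' : ∀ s ∈ PySem.Set.add v state, InBox g s := by
            intro s hs
            rcases (hmemv' s).mp hs with h | rfl
            · exact hinv.vbox s h
            · exact hbox
          have hcard : v.length + 1 ≤ boxP g := by
            have := card_box g (PySem.Set.add v state) hnodup' hvbox'
            rw [hlenv'] at this
            exact this
          refine ih (rest ++ ne) (PySem.Set.add v state)
            ⟨?_, ?_, ?_, hnodup', hvbox', ?_, hvsucc', ?_⟩ ?_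
          · -- qbox
            intro e he
            rcases List.mem_append.mp he with h | h
            · exact hinv.qbox e (List.mem_cons_of_mem _ h)
            · exact hnebox e h
          · -- qreach
            intro e he
            rcases List.mem_append.mp he with h | h
            · exact hinv.qreach e (List.mem_cons_of_mem _ h)
            · rcases hnemem e h with ⟨⟨ins, hins, h1⟩, h2, _, _⟩
              refine ⟨k₀ + 1, by rw [h2, hk₀]; push_cast; ring, ?_⟩
              have htr := (inc_translate hins hstl).1
              rw [h1, htr]
              exact DReach.step _ (inc_translate hins hstl).2 hr₀
          · -- qwin
            rw [List.pairwise_append]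
            refine ⟨hwin.2, ?_, ?_⟩
            · refine List.pairwise_of_forall_mem_list ?_
              intro a ha b hb
              rw [hne2 a ha, hne2 b hb]; omega
            · intro a ha b hb
              have h1 := hwin.1 _ ha
              rw [hne2 b hb]
              omega
          · -- vng
            intro h
            rcases (hmemv' g).mp h with h' | h'
            · exact hinv.vng h'
            · exact hgoal h'.symm
          · -- comp
            intro k t hreach hle htv'
            have htv : t ∉ v := fun h => htv' ((hmemv' t).mpr (Or.inl h))
            have htst : t ≠ state := fun h => htv' ((hmemv' t).mpr (Or.inr h))
            rcases hinv.comp k t hreach hle htv with ⟨s, i, l, hq, hr, hbound⟩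
            rcases List.mem_cons.mp hq with heq' | hrest'
            · have hs_eq : s = state := congrArg Prod.fst heq'
              have hi_eq : i = index := congrArg Prod.snd heq'
              rw [hs_eq] at hr
              rw [hi_eq] at hbound
              rcases DReach_headview hr with ⟨_, rfl⟩ | ⟨d, hd, l₀, rfl, hr'⟩
              · exact absurd rfl htst
              · rcases List.mem_map.mp hd with ⟨ins, hins, rfl⟩
                have htr := (inc_translate hins hstl).1
                have hs₁l : (vadd state (fspB_delta g.length ins)).length = g.length := by
                  rw [length_vadd, hstl, length_fspB_delta]; omega
                have hs₁g : VLe (vadd state (fspB_delta g.length ins)) g :=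
                  VLe_trans (DReach_mono (deltasA_len g I) (deltasA_nn g I) hs₁l hr') hle
                by_cases hs₁v : vadd state (fspB_delta g.length ins) ∈ PySem.Set.add v state
                · rcases walk g I (rest ++ ne) (PySem.Set.add v state) hvlen' hvsucc' l₀ _ t hr' hs₁v htv' hle
                    with ⟨u, i', l'', hq'', hu, hr'', hlt⟩
                  have hw := hqwin' _ hq''
                  refine ⟨u, i', l'', hq'', hr'', ?_⟩
                  have hcl : (l'' : Int) < (l₀ : Int) := by exact_mod_cast hlt
                  have hc2 : ((l₀ + 1 : Nat) : Int) = (l₀ : Int) + 1 := by push_cast; ring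
                  rw [hc2] at hbound
                  omega
                · have hmem := hnecov ins hins (by rwa [htr]) (by rwa [htr])
                  refine ⟨fspA_inc state ins, index + 1, l₀, List.mem_append.mpr (Or.inr hmem), by rwa [htr], ?_⟩
                  have hc2 : ((l₀ + 1 : Nat) : Int) = (l₀ : Int) + 1 := by push_cast; ring
                  rw [hc2] at hbound
                  omega
            · exact ⟨s, i, l, List.mem_append.mpr (Or.inl hrest'), hr, hbound⟩
          · -- fuel
            have hql : (rest ++ ne).length ≤ rest.length + I.length := by
              rw [List.length_append]; omega
            have hsub : boxP g - (PySem.Set.add v state).length = boxP g - v.length - 1 := by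
              rw [hlenv']; omega
            rw [hsub]
            have hexp : (I.length + 1) * (boxP g - v.length) =
                (I.length + 1) * (boxP g - v.length - 1) + (I.length + 1) := by
              have h6 : boxP g - List.length v - 1 + 1 = boxP g - List.length v := by omega
              calc (I.length + 1) * (boxP g - v.length)
                  = (I.length + 1) * ((boxP g - v.length - 1) + 1) := by rw [h6]
                _ = (I.length + 1) * (boxP g - v.length - 1) + (I.length + 1) := by ring
            simp only [List.length_cons] at hfuel
            omega

lemma A_answers (g : List Int) (I : List (List Int)) :
    IsAns (fun k => DReach (deltasA g I) k (ZV g.length) g)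
      (find_shortest_path_to_joltage_state g I) := by
  unfold find_shortest_path_to_joltage_state
  have hZ : List.replicate g.length (0 : Int) = ZV g.length := rfl
  refine A_main g I _ _ PySem.Set.empty ⟨?_, ?_, ?_, ?_, ?_, ?_, ?_, ?_⟩ ?_
  · intro e he
    rcases List.mem_singleton.mp he with rfl
    rw [hZ]  -- e.1 = ZV
    exact InBox_ZV g
  · intro e he
    rcases List.mem_singleton.mp he with rfl
    exact ⟨0, rfl, by rw [hZ]; exact DReach.refl _⟩
  · exact List.pairwise_singleton _ _
  · exact List.nodup_nil
  · intro s hs; simp [PySem.Set.empty] at hs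
  · simp [PySem.Set.empty]
  · intro u hu; simp [PySem.Set.empty] at hu
  · intro k t hreach hle htv
    exact ⟨ZV g.length, 0, k, by rw [hZ]; exact List.mem_singleton.mpr rfl, hreach, by omega⟩
  · have hbp : boxP g = (g.map (fun x => x.toNat + 1)).prod := rfl
    have hemp : (PySem.Set.empty : PySem.Set (List Int)).length = 0 := rfl
    simp only [List.length_cons, List.length_nil, hemp, Nat.sub_zero, hbp]
    omega

-- ===== VERDICT (by name: the statement is the Claim_ definition above) =====
theorem find_shortest_path_to_joltage_state_spec : Claim_equal_find_shortest_path_to_joltage_state := by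
  intro g I _dom _pre
  unfold Spec_find_shortest_path_to_joltage_state
  exact IsAns_unique (reach_transfer g I).1 (reach_transfer g I).2 (A_answers g I) (B_answers g I)
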